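-- pv_equiv track=rewrite | github.com/danagle/everybody-codes-challenges | 2024-kingdom-of-algorithmia/quest17.py | brilliant_constellations
-- ===== SOURCE A (Python) =====
-- import heapq
-- from collections import defaultdict
-- from itertools import combinations
--
-- def manhattan(a: tuple[int, int], b: tuple[int, int]) -> int:
--     """
--     Compute the Manhattan distance between two points.
--     """
--     return abs(a[0] - b[0]) + abs(a[1] - b[1])
--
-- def brilliant_constellations(stars: list[tuple[int, int]]) -> int:
--     """
--     Group stars into 'brilliant constellations' where any two stars
--     within Manhattan distance < 6 belong to the same constellation.
--
--     For each cluster, compute a local MST (via Prim’s algorithm)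
--     and record its size (MST total distance + number of nodes).
--
--     Returns:
--         The product of the sizes of the 3 largest constellations.
--     """
--     if not stars:
--         return 0
--
--     # Build adjacency list for stars within distance < 6
--     adjacency = defaultdict(list)
--     for s1, s2 in combinations(stars, 2):
--         d = manhattan(s1, s2)
--         if d < 6:
--             adjacency[s1].append((d, s2))
--             adjacency[s2].append((d, s1))
--
--     remaining = set(stars)
--     cluster_sizes = []
--
--     # Explore connected components using Prim’s algorithm
--     while remaining:
--         start = remaining.pop()
--         pq = [(0, start)]
--         seen = set()
--         total_distance = 0
--
--         while pq:
--             dist, node = heapq.heappop(pq)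
--             if node in seen:
--                 continue
--             seen.add(node)
--             total_distance += dist
--
--             for ndist, neighbor in adjacency[node]:
--                 if neighbor not in seen:
--                     heapq.heappush(pq, (ndist, neighbor))
--
--         # Store cluster size
--         cluster_sizes.append(total_distance + len(seen))
--
--         # Remove visited nodes from remaining
--         remaining -= seen
--
--     # Compute the product of the three largest clusters
--     cluster_sizes.sort()
--     if len(cluster_sizes) < 3:
--         return 0  # not enough constellations to multiply
--
--     return cluster_sizes[-1] * cluster_sizes[-2] * cluster_sizes[-3]
-- ===== SOURCE B (Python) =====
-- def brilliant_constellations(stars):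
--     """Dense Prim: no heap, no precomputed adjacency list.
--
--     For each new component we grow a tree, keeping for every frontier node the
--     cheapest known connecting distance in a dict, and repeatedly absorbing the
--     frontier node with the smallest (distance, node) key.
--     """
--     if not stars:
--         return 0
--     pts = list(dict.fromkeys(stars))
--     visited = set()
--     sizes = []
--     for s in pts:
--         if s in visited:
--             continue
--         best = {s: 0}
--         total = 0
--         count = 0
--         while best:
--             v = min(best, key=lambda p: (best[p], p))
--             d = best.pop(v)
--             visited.add(v)
--             total += d
--             count += 1
--             for w in pts:
--                 if w in visited:
--                     continue
--                 nd = abs(v[0] - w[0]) + abs(v[1] - w[1])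
--                 if nd < 6 and (w not in best or nd < best[w]):
--                     best[w] = nd
--         sizes.append(total + count)
--     if len(sizes) < 3:
--         return 0
--     sizes.sort()
--     return sizes[-1] * sizes[-2] * sizes[-3]
-- ===== Notes on version B (the rewrite author's own statement) =====
-- stated objective: alternative
-- what changed: A enumerates all star pairs with itertools.combinations to build adjacency lists and runs lazy heap-based Prim per component; B keeps no heap and no edge list at all: it runs dense Prim, maintaining a dict of cheapest known frontier distances, picking the minimal (distance, node) frontier entry and updating distances by computing Manhattan distances on the fly during a scan of the deduplicated points.
import Mathlib
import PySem

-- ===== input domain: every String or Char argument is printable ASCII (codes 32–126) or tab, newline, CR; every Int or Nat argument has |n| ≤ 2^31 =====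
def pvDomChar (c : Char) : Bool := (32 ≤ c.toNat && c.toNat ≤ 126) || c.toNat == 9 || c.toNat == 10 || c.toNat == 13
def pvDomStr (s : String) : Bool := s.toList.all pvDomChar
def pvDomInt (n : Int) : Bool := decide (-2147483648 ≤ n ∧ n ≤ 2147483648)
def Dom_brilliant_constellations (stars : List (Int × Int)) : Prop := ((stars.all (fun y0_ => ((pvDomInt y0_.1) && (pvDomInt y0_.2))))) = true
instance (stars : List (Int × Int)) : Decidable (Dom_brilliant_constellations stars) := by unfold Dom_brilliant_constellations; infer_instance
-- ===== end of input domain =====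

-- B replaces A's combinations-built adjacency lists + lazy heap Prim by a dense dict-based Prim
-- (no heap, no edge list: cheapest frontier distances kept in a dict, Manhattan distances computed
-- on the fly); objective: alternative algorithm of similar cost.
-- Python's set.pop() iteration order is unspecified; the ports pick elements in first-insertion
-- order — the returned value does not depend on that choice (each cluster size is order-independent
-- and the size list is sorted before use).

-- ===== PORT A =====

def pvManhattan (a b : Int × Int) : Int := |a.1 - b.1| + |a.2 - b.2|

-- itertools.combinations(stars, 2)
def pvCombos : List (Int × Int) → List ((Int × Int) × (Int × Int))
  | [] => []
  | x :: xs => xs.map (fun y => (x, y)) ++ pvCombos xs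

-- adjacency = defaultdict(list); adjacency[s1].append((d, s2)); adjacency[s2].append((d, s1))
def pvBuildAdj (stars : List (Int × Int)) : PySem.Dict (Int × Int) (List (Int × (Int × Int))) :=
  (pvCombos stars).foldl
    (fun adj p =>
      let d := pvManhattan p.1 p.2
      if d < 6 then
        (adj.modify p.1 [] (fun l => l ++ [(d, p.2)])).modify p.2 [] (fun l => l ++ [(d, p.1)])
      else adj)
    PySem.Dict.empty

-- Python tuple order (dist, (x, y)) used by heapq
def pvEntryLe (a b : Int × (Int × Int)) : Bool :=
  decide (a.1 < b.1) || (decide (a.1 = b.1) &&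
    (decide (a.2.1 < b.2.1) || (decide (a.2.1 = b.2.1) && decide (a.2.2 ≤ b.2.2))))

-- heapq.heappop: the heap is modelled as the multiset of its entries; pop removes a least entry
def pvPopMin (pq : List (Int × (Int × Int))) :
    Option ((Int × (Int × Int)) × List (Int × (Int × Int))) :=
  match pq with
  | [] => none
  | x :: xs =>
    let m := xs.foldl (fun m e => if pvEntryLe m e then m else e) x
    some (m, pq.erase m)

-- inner `while pq:` loop of A (fuel makes the recursion total; proved never exhausted)
def pvPrimA (adj : PySem.Dict (Int × Int) (List (Int × (Int × Int)))) :
    Nat → List (Int × (Int × Int)) → PySem.Set (Int × Int) → Int → Int × PySem.Set (Int × Int)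
  | 0, _, seen, total => (total, seen)
  | fuel + 1, pq, seen, total =>
    match pvPopMin pq with
    | none => (total, seen)
    | some ((dist, node), rest) =>
      if PySem.Set.contains seen node then pvPrimA adj fuel rest seen total
      else
        let seen' := seen.add node
        let pushes := (adj.getD node []).filter (fun e => ! PySem.Set.contains seen' e.2)
        pvPrimA adj fuel (rest ++ pushes) seen' (total + dist)

-- outer `while remaining:` loop of A (pop = first element, see header note)
def pvLoopA (adj : PySem.Dict (Int × Int) (List (Int × (Int × Int)))) (fuel : Nat) :
    List (Int × Int) → List Int → List Int
  | [], sizes => sizes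
  | start :: rest, sizes =>
    let r := pvPrimA adj fuel [(0, start)] PySem.Set.empty 0
    pvLoopA adj fuel (rest.filter (fun x => ! PySem.Set.contains r.2 x))
      (sizes ++ [r.1 + PySem.Set.len r.2])
  termination_by remaining _ => remaining.length
  decreasing_by
    simp only [List.length_cons, List.length_unattach]
    exact Nat.lt_succ_of_le (le_trans (List.length_filter_le _ _) (by simp))

def brilliant_constellations (stars : List (Int × Int)) : Int :=
  if stars = [] then 0
  else
    let adjacency := pvBuildAdj stars
    let fuel := stars.length * (2 * stars.length * stars.length) + 1
    let cluster_sizes := pvLoopA adjacency fuel (PySem.Set.ofList stars) []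
    let sorted := PySem.List.sorted cluster_sizes (fun x => x)
    if sorted.length < 3 then 0
    else
      PySem.List.pyGetD sorted (-1) 0 * PySem.List.pyGetD sorted (-2) 0 *
        PySem.List.pyGetD sorted (-3) 0

-- ===== PORT B =====

-- Python's min(best, key=lambda p: (best[p], p)) over the dict's (key, value) items
def pvKeyLt (a b : (Int × Int) × Int) : Bool :=
  decide (a.2 < b.2) || (decide (a.2 = b.2) &&
    (decide (a.1.1 < b.1.1) || (decide (a.1.1 = b.1.1) && decide (a.1.2 < b.1.2))))

def pvMinItem : List ((Int × Int) × Int) → Option ((Int × Int) × Int)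
  | [] => none
  | x :: xs => some (xs.foldl (fun m e => if pvKeyLt e m then e else m) x)

-- inner `while best:` loop of B (fuel makes the recursion total; proved never exhausted)
def pvPrimB (pts : List (Int × Int)) :
    Nat → PySem.Dict (Int × Int) Int → PySem.Set (Int × Int) → Int → Int →
      Int × Int × PySem.Set (Int × Int)
  | 0, _, visited, total, count => (total, count, visited)
  | fuel + 1, best, visited, total, count =>
    match pvMinItem best.items with
    | none => (total, count, visited)
    | some (v, d) =>
      let best1 := best.erase v
      let visited' := visited.add v
      let best2 := pts.foldl
        (fun b w =>
          if PySem.Set.contains visited' w then b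
          else
            let nd := |v.1 - w.1| + |v.2 - w.2|
            if nd < 6 then
              match b.get? w with
              | none => b.insert w nd
              | some old => if nd < old then b.insert w nd else b
            else b)
        best1
      pvPrimB pts fuel best2 visited' (total + d) (count + 1)

-- outer `for s in pts:` loop of B
def pvLoopB (pts : List (Int × Int)) (fuel : Nat) :
    List (Int × Int) → PySem.Set (Int × Int) → List Int → List Int
  | [], _, sizes => sizes
  | s :: rest, visited, sizes =>
    if PySem.Set.contains visited s then pvLoopB pts fuel rest visited sizes
    else
      let r := pvPrimB pts fuel (PySem.Dict.empty.insert s 0) visited 0 0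
      pvLoopB pts fuel rest r.2.2 (sizes ++ [r.1 + r.2.1])

def brilliant_constellations_alt (stars : List (Int × Int)) : Int :=
  if stars = [] then 0
  else
    let pts := PySem.List.dedup stars
    let sizes := pvLoopB pts (stars.length + 1) pts PySem.Set.empty []
    if sizes.length < 3 then 0
    else
      let sorted := PySem.List.sorted sizes (fun x => x)
      PySem.List.pyGetD sorted (-1) 0 * PySem.List.pyGetD sorted (-2) 0 *
        PySem.List.pyGetD sorted (-3) 0

-- ===== PRECONDITION & SPEC =====
def Spec_brilliant_constellations (stars : List (Int × Int)) (out : Int) : Prop := out = brilliant_constellations_alt stars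
instance (stars : List (Int × Int)) (out : Int) : Decidable (Spec_brilliant_constellations stars out) := by unfold Spec_brilliant_constellations; infer_instance

-- ===== CLAIM (what is proved, stated in full; the proofs are below) =====
def Claim_equal_brilliant_constellations : Prop := ∀ (stars : List (Int × Int)), Dom_brilliant_constellations stars → Spec_brilliant_constellations stars (brilliant_constellations stars)

-- ===== LEMMAS AND PROOFS =====

-- ---------- basic geometry / combinations facts ----------

lemma pvManhattan_comm (a b : Int × Int) : pvManhattan a b = pvManhattan b a := by
  simp [pvManhattan, abs_sub_comm]

lemma mem_pvCombos : ∀ {l : List (Int × Int)} {p}, p ∈ pvCombos l → p.1 ∈ l ∧ p.2 ∈ l := by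
  intro l
  induction l with
  | nil => intro p h; simp [pvCombos] at h
  | cons x xs ih =>
    intro p h
    simp only [pvCombos, List.mem_append, List.mem_map] at h
    rcases h with ⟨y, hy, rfl⟩ | h
    · exact ⟨by simp, by simp [hy]⟩
    · exact ⟨List.mem_cons_of_mem _ (ih h).1, List.mem_cons_of_mem _ (ih h).2⟩

lemma pvCombos_total : ∀ (l : List (Int × Int)) {u v : Int × Int}, u ∈ l → v ∈ l → u ≠ v →
    (u, v) ∈ pvCombos l ∨ (v, u) ∈ pvCombos l := by
  intro l
  induction l with
  | nil => intro u v hu _ _; simp at hu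
  | cons x xs ih =>
    intro u v hu hv hne
    rcases List.mem_cons.1 hu with rfl | hu'
    · have hv' : v ∈ xs := by
        rcases List.mem_cons.1 hv with rfl | h
        · exact absurd rfl hne
        · exact h
      exact Or.inl (by
        simp only [pvCombos, List.mem_append, List.mem_map]
        exact Or.inl ⟨v, hv', rfl⟩)
    · rcases List.mem_cons.1 hv with rfl | hv'
      · exact Or.inr (by
          simp only [pvCombos, List.mem_append, List.mem_map]
          exact Or.inl ⟨u, hu', rfl⟩)
      · rcases ih hu' hv' hne with h | h
        · exact Or.inl (by simp only [pvCombos, List.mem_append]; exact Or.inr h)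
        · exact Or.inr (by simp only [pvCombos, List.mem_append]; exact Or.inr h)

lemma length_pvCombos_le (l : List (Int × Int)) : (pvCombos l).length ≤ l.length * l.length := by
  induction l with
  | nil => simp [pvCombos]
  | cons x xs ih =>
    simp only [pvCombos, List.length_append, List.length_map, List.length_cons]
    nlinarith

-- ---------- the adjacency dict, characterised through a directed edge list ----------

def pvDirEdges (stars : List (Int × Int)) : List ((Int × Int) × (Int × (Int × Int))) :=
  (pvCombos stars).flatMap (fun p =>
    if pvManhattan p.1 p.2 < 6 then
      [(p.1, (pvManhattan p.1 p.2, p.2)), (p.2, (pvManhattan p.1 p.2, p.1))]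
    else [])

lemma pvBuildAdj_eq (stars : List (Int × Int)) : pvBuildAdj stars =
    (pvDirEdges stars).foldl (fun d p => d.modify p.1 [] (fun l => l ++ [p.2]))
      PySem.Dict.empty := by
  unfold pvBuildAdj pvDirEdges
  generalize pvCombos stars = l
  suffices h : ∀ (l : List ((Int × Int) × (Int × Int)))
      (d : PySem.Dict (Int × Int) (List (Int × (Int × Int)))),
      l.foldl (fun adj p =>
        let dd := pvManhattan p.1 p.2
        if dd < 6 then
          (adj.modify p.1 [] (fun l => l ++ [(dd, p.2)])).modify p.2 [] (fun l => l ++ [(dd, p.1)])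
        else adj) d =
      (l.flatMap (fun p =>
        if pvManhattan p.1 p.2 < 6 then
          [(p.1, (pvManhattan p.1 p.2, p.2)), (p.2, (pvManhattan p.1 p.2, p.1))]
        else [])).foldl (fun d p => d.modify p.1 [] (fun l => l ++ [p.2])) d by
    exact h l _
  intro l
  induction l with
  | nil => intro d; rfl
  | cons p ps ih =>
    intro d
    simp only [List.foldl_cons, List.flatMap_cons, List.foldl_append]
    by_cases hd : pvManhattan p.1 p.2 < 6
    · simp only [hd, if_pos, List.foldl_cons, List.foldl_nil]
      exact ih _
    · simp only [hd, if_neg, not_false_iff, List.foldl_nil]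
      exact ih _

lemma pvAdj_getD (stars : List (Int × Int)) (u : Int × Int) :
    (pvBuildAdj stars).getD u [] =
      ((pvDirEdges stars).filter (fun p => p.1 == u)).map (fun x => x.2) := by
  rw [pvBuildAdj_eq]
  simpa using PySem.Dict.getD_foldl_modify_append (pvDirEdges stars) PySem.Dict.empty u

lemma pvMem_adj {stars : List (Int × Int)} {u v : Int × Int} (hne : v ≠ u) (d : Int) :
    (d, v) ∈ (pvBuildAdj stars).getD u [] ↔
      u ∈ stars ∧ v ∈ stars ∧ d = pvManhattan u v ∧ d < 6 := by
  rw [pvAdj_getD]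
  simp only [List.mem_map, List.mem_filter, beq_iff_eq]
  constructor
  · rintro ⟨q, ⟨hq, hq1⟩, hq2⟩
    simp only [pvDirEdges, List.mem_flatMap] at hq
    obtain ⟨r, hr, hmem⟩ := hq
    by_cases hlt : pvManhattan r.1 r.2 < 6
    · simp only [hlt, if_pos, List.mem_cons] at hmem
      have hrs := mem_pvCombos hr
      rcases hmem with h | h | h
      · have h1 : q.1 = r.1 := by rw [h]
        have h2 : q.2 = (pvManhattan r.1 r.2, r.2) := by rw [h]
        rw [hq1] at h1
        rw [hq2] at h2
        have hd : d = pvManhattan r.1 r.2 := (Prod.mk.injEq _ _ _ _ ▸ h2).1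
        have hv : v = r.2 := (Prod.mk.injEq _ _ _ _ ▸ h2).2
        subst h1; subst hv
        exact ⟨hrs.1, hrs.2, by rw [hd], hd ▸ hlt⟩
      · have h1 : q.1 = r.2 := by rw [h]
        have h2 : q.2 = (pvManhattan r.1 r.2, r.1) := by rw [h]
        rw [hq1] at h1
        rw [hq2] at h2
        have hd : d = pvManhattan r.1 r.2 := (Prod.mk.injEq _ _ _ _ ▸ h2).1
        have hv : v = r.1 := (Prod.mk.injEq _ _ _ _ ▸ h2).2
        subst h1; subst hv
        refine ⟨hrs.2, hrs.1, ?_, hd ▸ hlt⟩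
        rw [hd, pvManhattan_comm]
      · simp at h
    · simp [hlt] at hmem
  · rintro ⟨hu, hv, rfl, hlt⟩
    have hne' : u ≠ v := fun h => hne h.symm
    rcases pvCombos_total stars hu hv hne' with h | h
    · refine ⟨(u, (pvManhattan u v, v)), ⟨?_, rfl⟩, rfl⟩
      simp only [pvDirEdges, List.mem_flatMap]
      exact ⟨(u, v), h, by simp [hlt]⟩
    · refine ⟨(u, (pvManhattan u v, v)), ⟨?_, rfl⟩, rfl⟩
      simp only [pvDirEdges, List.mem_flatMap]
      refine ⟨(v, u), h, ?_⟩
      have hc : pvManhattan v u = pvManhattan u v := pvManhattan_comm v u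
      simp [hc, hlt]

lemma length_pvDirEdges_le (stars : List (Int × Int)) :
    (pvDirEdges stars).length ≤ 2 * (stars.length * stars.length) := by
  have h1 : (pvDirEdges stars).length ≤ 2 * (pvCombos stars).length := by
    unfold pvDirEdges
    induction pvCombos stars with
    | nil => simp
    | cons p ps ih =>
      simp only [List.flatMap_cons, List.length_append, List.length_cons]
      have : (if pvManhattan p.1 p.2 < 6 then
          [(p.1, (pvManhattan p.1 p.2, p.2)), (p.2, (pvManhattan p.1 p.2, p.1))]
        else ([] : List ((Int × Int) × (Int × (Int × Int))))).length ≤ 2 := by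
        split <;> simp
      omega
  have h2 := length_pvCombos_le stars
  omega

lemma length_pvAdj_le (stars : List (Int × Int)) (u : Int × Int) :
    ((pvBuildAdj stars).getD u []).length ≤ (pvDirEdges stars).length := by
  rw [pvAdj_getD]
  simpa using List.length_filter_le _ _


-- ---------- the two selection orders ----------

lemma pvEntryLe_iff (a b : Int × (Int × Int)) : pvEntryLe a b = true ↔
    (a.1 < b.1 ∨ (a.1 = b.1 ∧ (a.2.1 < b.2.1 ∨ (a.2.1 = b.2.1 ∧ a.2.2 ≤ b.2.2)))) := by
  simp [pvEntryLe]

lemma pvEntryLe_refl (a : Int × (Int × Int)) : pvEntryLe a a = true := by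
  simp [pvEntryLe_iff]

lemma pvEntryLe_total (a b : Int × (Int × Int)) : pvEntryLe a b = true ∨ pvEntryLe b a = true := by
  simp only [pvEntryLe_iff]; omega

lemma pvEntryLe_trans {a b c : Int × (Int × Int)} (h1 : pvEntryLe a b = true)
    (h2 : pvEntryLe b c = true) : pvEntryLe a c = true := by
  simp only [pvEntryLe_iff] at *; omega

lemma pvKeyLt_iff (a b : (Int × Int) × Int) : pvKeyLt a b = true ↔
    (a.2 < b.2 ∨ (a.2 = b.2 ∧ (a.1.1 < b.1.1 ∨ (a.1.1 = b.1.1 ∧ a.1.2 < b.1.2)))) := by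
  simp [pvKeyLt]

lemma pvKeyLt_asymm {a b : (Int × Int) × Int} (h : pvKeyLt a b = true) :
    ¬ pvKeyLt b a = true := by
  simp only [pvKeyLt_iff] at *; omega

lemma pvFoldMin_spec : ∀ (xs : List (Int × (Int × Int))) (x : Int × (Int × Int)),
    (xs.foldl (fun m e => if pvEntryLe m e then m else e) x = x ∨
      xs.foldl (fun m e => if pvEntryLe m e then m else e) x ∈ xs) ∧
    pvEntryLe (xs.foldl (fun m e => if pvEntryLe m e then m else e) x) x = true ∧
    ∀ e ∈ xs, pvEntryLe (xs.foldl (fun m e => if pvEntryLe m e then m else e) x) e = true := by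
  intro xs
  induction xs with
  | nil => intro x; exact ⟨Or.inl rfl, pvEntryLe_refl x, by simp⟩
  | cons y ys ih =>
    intro x
    simp only [List.foldl_cons]
    by_cases h : pvEntryLe x y = true
    · simp only [h, if_pos]
      obtain ⟨hm, hle, hall⟩ := ih x
      refine ⟨?_, hle, ?_⟩
      · rcases hm with hm | hm
        · exact Or.inl hm
        · exact Or.inr (List.mem_cons_of_mem _ hm)
      · intro e he
        rcases List.mem_cons.1 he with rfl | he'
        · exact pvEntryLe_trans hle h
        · exact hall e he'
    · have hxy : pvEntryLe x y = false := by rwa [Bool.not_eq_true] at h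
      simp only [hxy, Bool.false_eq_true, if_false]
      have hyx : pvEntryLe y x = true := by
        rcases pvEntryLe_total x y with h' | h'
        · rw [h'] at hxy; exact absurd hxy (by simp)
        · exact h'
      obtain ⟨hm, hle, hall⟩ := ih y
      refine ⟨?_, pvEntryLe_trans hle hyx, ?_⟩
      · rcases hm with hm | hm
        · exact Or.inr (by rw [hm]; exact List.mem_cons_self)
        · exact Or.inr (List.mem_cons_of_mem _ hm)
      · intro e he
        rcases List.mem_cons.1 he with rfl | he'
        · exact hle
        · exact hall e he'

lemma pvPopMin_none_iff (pq : List (Int × (Int × Int))) : pvPopMin pq = none ↔ pq = [] := by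
  cases pq <;> simp [pvPopMin]

lemma pvPopMin_spec {pq : List (Int × (Int × Int))} {m rest}
    (h : pvPopMin pq = some (m, rest)) :
    m ∈ pq ∧ rest = pq.erase m ∧ ∀ e ∈ pq, pvEntryLe m e = true := by
  cases pq with
  | nil => simp [pvPopMin] at h
  | cons x xs =>
    simp only [pvPopMin, Option.some.injEq, Prod.mk.injEq] at h
    obtain ⟨hm, hrest⟩ := h
    subst hm
    subst hrest
    obtain ⟨hmem, hle, hall⟩ := pvFoldMin_spec xs x
    refine ⟨?_, rfl, ?_⟩
    · rcases hmem with h' | h'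
      · rw [h']; exact List.mem_cons_self
      · exact List.mem_cons_of_mem _ h'
    · intro e he
      rcases List.mem_cons.1 he with rfl | he'
      · exact hle
      · exact hall e he'

lemma pvFoldMinKey_eq : ∀ (xs : List ((Int × Int) × Int)) (acc x : (Int × Int) × Int),
    (x = acc ∨ x ∈ xs) → (∀ y, (y = acc ∨ y ∈ xs) → y ≠ x → pvKeyLt x y = true) →
    xs.foldl (fun m e => if pvKeyLt e m then e else m) acc = x := by
  intro xs
  induction xs with
  | nil =>
    intro acc x hx _
    rcases hx with rfl | hx
    · rfl
    · simp at hx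
  | cons e es ih =>
    intro acc x hx hmin
    simp only [List.foldl_cons]
    have hmin_tail : ∀ y, (y = (if pvKeyLt e acc = true then e else acc) ∨ y ∈ es) →
        y ≠ x → pvKeyLt x y = true := by
      intro y hy hne
      rcases hy with rfl | hy
      · by_cases hlt : pvKeyLt e acc = true
        · simp only [hlt, if_pos] at hne ⊢
          exact hmin e (Or.inr List.mem_cons_self) hne
        · simp only [hlt, Bool.false_eq_true, if_false] at hne ⊢
          exact hmin acc (Or.inl rfl) hne
      · exact hmin y (Or.inr (List.mem_cons_of_mem _ hy)) hne
    have hmem_tail : x = (if pvKeyLt e acc = true then e else acc) ∨ x ∈ es := by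
      rcases hx with rfl | hx
      · by_cases hlt : pvKeyLt e x = true
        · by_cases hex : e = x
          · left
            have h2 : (if pvKeyLt e x = true then e else x) = e := by simp [hlt]
            rw [h2]; exact hex.symm
          · have h1 : pvKeyLt x e = true := hmin e (Or.inr List.mem_cons_self) hex
            exact absurd hlt (pvKeyLt_asymm h1)
        · left
          have h2 : (if pvKeyLt e x = true then e else x) = x := by simp [hlt]
          rw [h2]
      · rcases List.mem_cons.1 hx with heq | hx'
        · by_cases hlt : pvKeyLt e acc = true
          · left
            have h2 : (if pvKeyLt e acc = true then e else acc) = e := by simp [hlt]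
            rw [h2]; exact heq
          · by_cases hax : acc = x
            · left
              have h2 : (if pvKeyLt e acc = true then e else acc) = acc := by simp [hlt]
              rw [h2]; exact hax.symm
            · have h1 : pvKeyLt x acc = true := hmin acc (Or.inl rfl) hax
              rw [← heq] at hlt
              exact absurd h1 hlt
        · exact Or.inr hx'
    exact ih _ x hmem_tail hmin_tail

lemma pvMinItem_eq {items : List ((Int × Int) × Int)} {x} (hx : x ∈ items)
    (hmin : ∀ y ∈ items, y ≠ x → pvKeyLt x y = true) : pvMinItem items = some x := by
  cases items with
  | nil => simp at hx
  | cons a as =>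
    simp only [pvMinItem, Option.some.injEq]
    apply pvFoldMinKey_eq as a x
    · rcases List.mem_cons.1 hx with rfl | h
      · exact Or.inl rfl
      · exact Or.inr h
    · intro y hy hne
      rcases hy with rfl | hy
      · exact hmin y List.mem_cons_self hne
      · exact hmin y (List.mem_cons_of_mem _ hy) hne

-- ---------- option-valued minimum of an Int list ----------

def pvMinD? : List Int → Option Int
  | [] => none
  | x :: xs => some (xs.foldl min x)

lemma pvFoldIntMin_spec : ∀ (xs : List Int) (x : Int),
    (xs.foldl min x = x ∨ xs.foldl min x ∈ xs) ∧ xs.foldl min x ≤ x ∧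
      ∀ e ∈ xs, xs.foldl min x ≤ e := by
  intro xs
  induction xs with
  | nil => intro x; exact ⟨Or.inl rfl, le_refl x, by simp⟩
  | cons y ys ih =>
    intro x
    simp only [List.foldl_cons]
    obtain ⟨hm, hle, hall⟩ := ih (min x y)
    refine ⟨?_, le_trans hle (min_le_left x y), ?_⟩
    · rcases hm with hm | hm
      · rcases le_total x y with h' | h'
        · exact Or.inl (by rw [hm, min_eq_left h'])
        · exact Or.inr (by rw [hm, min_eq_right h']; exact List.mem_cons_self)
      · exact Or.inr (List.mem_cons_of_mem _ hm)
    · intro e he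
      rcases List.mem_cons.1 he with rfl | he'
      · exact le_trans hle (min_le_right x e)
      · exact hall e he'

lemma pvMinD?_eq_some {l : List Int} {d : Int} (hd : d ∈ l) (hmin : ∀ e ∈ l, d ≤ e) :
    pvMinD? l = some d := by
  cases l with
  | nil => simp at hd
  | cons x xs =>
    simp only [pvMinD?, Option.some.injEq]
    obtain ⟨hm, hle, hall⟩ := pvFoldIntMin_spec xs x
    have h1 : xs.foldl min x ≤ d := by
      rcases List.mem_cons.1 hd with rfl | h
      · exact hle
      · exact hall d h
    have h2 : d ≤ xs.foldl min x := by
      rcases hm with hm | hm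
      · rw [hm]; exact hmin x List.mem_cons_self
      · exact hmin _ (List.mem_cons_of_mem _ hm)
    omega

lemma pvMinD?_spec {l : List Int} {d : Int} (h : pvMinD? l = some d) :
    d ∈ l ∧ ∀ e ∈ l, d ≤ e := by
  cases l with
  | nil => simp [pvMinD?] at h
  | cons x xs =>
    simp only [pvMinD?, Option.some.injEq] at h
    obtain ⟨hm, hle, hall⟩ := pvFoldIntMin_spec xs x
    subst h
    refine ⟨?_, ?_⟩
    · rcases hm with hm | hm
      · rw [hm]; exact List.mem_cons_self
      · exact List.mem_cons_of_mem _ hm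
    · intro e he
      rcases List.mem_cons.1 he with rfl | he'
      · exact hle
      · exact hall e he'

lemma pvMinD?_append_singleton (l : List Int) (a : Int) :
    pvMinD? (l ++ [a]) = some (match pvMinD? l with | none => a | some m => min m a) := by
  cases l with
  | nil => simp [pvMinD?]
  | cons x xs => simp [pvMinD?, List.foldl_append]

-- ---------- dict erase lemmas (PySem has none for erase) ----------

lemma pvGet?_erase_self {ν : Type} (d : PySem.Dict (Int × Int) ν) (k : Int × Int) :
    (d.erase k).get? k = none := by
  cases d with
  | mk items =>
    simp only [PySem.Dict.erase, PySem.Dict.get?, Option.map_eq_none_iff]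
    rw [List.find?_eq_none]
    intro p hp
    have := (List.mem_filter.1 hp).2
    simpa using this

lemma pvGet?_erase_of_ne {ν : Type} (d : PySem.Dict (Int × Int) ν) {k k' : Int × Int}
    (h : k' ≠ k) : (d.erase k).get? k' = d.get? k' := by
  cases d with
  | mk items =>
    simp only [PySem.Dict.erase, PySem.Dict.get?]
    congr 1
    induction items with
    | nil => rfl
    | cons p ps ih =>
      by_cases hk : p.1 = k
      · have h1 : (p.1 == k) = true := by simp [hk]
        have h2 : (p.1 == k') = false := by
          rw [hk]
          simp only [beq_eq_false_iff_ne, ne_eq]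
          exact fun hh => h hh.symm
        simp only [List.filter_cons, h1, Bool.not_true, Bool.false_eq_true, if_false,
          List.find?_cons, h2]
        exact ih
      · have h1 : (p.1 == k) = false := by simp [hk]
        simp only [List.filter_cons, h1, Bool.not_false, if_true, List.find?_cons]
        by_cases hk' : p.1 = k'
        · simp [hk']
        · have h2 : (p.1 == k') = false := by simp [hk']
          simp only [h2]
          exact ih

lemma pvNodup_keys_erase {ν : Type} (d : PySem.Dict (Int × Int) ν) (k : Int × Int)
    (h : d.keys.Nodup) : (d.erase k).keys.Nodup := by
  cases d with
  | mk items =>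
    simp only [PySem.Dict.erase, PySem.Dict.keys] at *
    exact h.sublist (List.Sublist.map _ List.filter_sublist)

lemma pvPrimB_empty (pts : List (Int × Int)) (fb : Nat) (best : PySem.Dict (Int × Int) Int)
    (visited : PySem.Set (Int × Int)) (total count : Int) (h : best.items = []) :
    pvPrimB pts fb best visited total count = (total, count, visited) := by
  cases fb with
  | zero => rfl
  | succ n => simp [pvPrimB, h, pvMinItem]

-- ---------- frontier ("best") dict characterisation ----------

def pvCross (seen : List (Int × Int)) (w : Int × Int) : List Int :=
  (seen.filter (fun u => decide (u ≠ w) && decide (pvManhattan u w < 6))).map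
    (fun u => pvManhattan u w)

lemma pvMem_cross {seen : List (Int × Int)} {w : Int × Int} {e : Int} :
    e ∈ pvCross seen w ↔ ∃ u ∈ seen, u ≠ w ∧ pvManhattan u w < 6 ∧ e = pvManhattan u w := by
  simp only [pvCross, List.mem_map, List.mem_filter, Bool.and_eq_true, decide_eq_true_eq]
  constructor
  · rintro ⟨u, ⟨hu, hne, hlt⟩, rfl⟩
    exact ⟨u, hu, hne, hlt, rfl⟩
  · rintro ⟨u, hu, hne, hlt, rfl⟩
    exact ⟨u, ⟨hu, hne, hlt⟩, rfl⟩

lemma pvCross_append (seen : List (Int × Int)) (v w : Int × Int) :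
    pvCross (seen ++ [v]) w = pvCross seen w ++
      (if v ≠ w ∧ pvManhattan v w < 6 then [pvManhattan v w] else []) := by
  simp only [pvCross, List.filter_append, List.map_append]
  congr 1
  by_cases h1 : v ≠ w
  · by_cases h2 : pvManhattan v w < 6
    · simp [h1, h2]
    · simp [h1, h2]
  · simp [h1]

-- the update performed by B's inner `for w in pts:` loop, and its effect on one key
def pvUpd (visited' : PySem.Set (Int × Int)) (v : Int × Int)
    (b : PySem.Dict (Int × Int) Int) (w : Int × Int) : PySem.Dict (Int × Int) Int :=
  if PySem.Set.contains visited' w then b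
  else if pvManhattan v w < 6 then
    match b.get? w with
    | none => b.insert w (pvManhattan v w)
    | some old => if pvManhattan v w < old then b.insert w (pvManhattan v w) else b
  else b

def pvF (v w : Int × Int) (visited' : PySem.Set (Int × Int)) (o : Option Int) : Option Int :=
  if PySem.Set.contains visited' w then o
  else if pvManhattan v w < 6 then
    match o with
    | none => some (pvManhattan v w)
    | some old => if pvManhattan v w < old then some (pvManhattan v w) else some old
  else o

lemma pvUpd_get?_of_ne (vis : PySem.Set (Int × Int)) (v : Int × Int)
    (b : PySem.Dict (Int × Int) Int) {x w : Int × Int} (h : w ≠ x) :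
    (pvUpd vis v b x).get? w = b.get? w := by
  unfold pvUpd
  by_cases hc : PySem.Set.contains vis x = true
  · rw [if_pos hc]
  · rw [if_neg hc]
    by_cases hlt : pvManhattan v x < 6
    · rw [if_pos hlt]
      cases hb : b.get? x with
      | none => exact PySem.Dict.get?_insert_of_ne b _ h
      | some old =>
        show (if pvManhattan v x < old then b.insert x (pvManhattan v x) else b).get? w = b.get? w
        by_cases ho : pvManhattan v x < old
        · rw [if_pos ho]; exact PySem.Dict.get?_insert_of_ne b _ h
        · rw [if_neg ho]
    · rw [if_neg hlt]

lemma pvUpd_get?_self (vis : PySem.Set (Int × Int)) (v : Int × Int)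
    (b : PySem.Dict (Int × Int) Int) (w : Int × Int) :
    (pvUpd vis v b w).get? w = pvF v w vis (b.get? w) := by
  unfold pvUpd pvF
  by_cases hc : PySem.Set.contains vis w = true
  · rw [if_pos hc, if_pos hc]
  · rw [if_neg hc, if_neg hc]
    by_cases hlt : pvManhattan v w < 6
    · rw [if_pos hlt, if_pos hlt]
      cases hb : b.get? w with
      | none => exact PySem.Dict.get?_insert_self b w _
      | some old =>
        show (if pvManhattan v w < old then b.insert w (pvManhattan v w) else b).get? w =
          (if pvManhattan v w < old then some (pvManhattan v w) else some old)
        by_cases ho : pvManhattan v w < old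
        · rw [if_pos ho, if_pos ho]; exact PySem.Dict.get?_insert_self b w _
        · rw [if_neg ho, if_neg ho]; exact hb
    · rw [if_neg hlt, if_neg hlt]

lemma pvUpd_nodup (vis : PySem.Set (Int × Int)) (v : Int × Int)
    (b : PySem.Dict (Int × Int) Int) (x : Int × Int) (h : b.keys.Nodup) :
    (pvUpd vis v b x).keys.Nodup := by
  unfold pvUpd
  by_cases hc : PySem.Set.contains vis x = true
  · rw [if_pos hc]; exact h
  · rw [if_neg hc]
    by_cases hlt : pvManhattan v x < 6
    · rw [if_pos hlt]
      cases b.get? x with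
      | none => exact PySem.Dict.nodup_keys_insert b _ _ h
      | some old =>
        show (if pvManhattan v x < old then b.insert x (pvManhattan v x) else b).keys.Nodup
        by_cases ho : pvManhattan v x < old
        · rw [if_pos ho]; exact PySem.Dict.nodup_keys_insert b _ _ h
        · rw [if_neg ho]; exact h
    · rw [if_neg hlt]; exact h

lemma pvFold_nodup (vis : PySem.Set (Int × Int)) (v : Int × Int) :
    ∀ (l : List (Int × Int)) (b : PySem.Dict (Int × Int) Int), b.keys.Nodup →
      ((l.foldl (pvUpd vis v) b).keys).Nodup := by
  intro l
  induction l with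
  | nil => intro b h; exact h
  | cons x xs ih =>
    intro b h
    exact ih _ (pvUpd_nodup vis v b x h)

lemma pvFold_get?_of_not_mem (vis : PySem.Set (Int × Int)) (v : Int × Int) :
    ∀ (l : List (Int × Int)) (b : PySem.Dict (Int × Int) Int) (w : Int × Int), w ∉ l →
      (l.foldl (pvUpd vis v) b).get? w = b.get? w := by
  intro l
  induction l with
  | nil => intro b w _; rfl
  | cons x xs ih =>
    intro b w hw
    simp only [List.foldl_cons]
    rw [ih _ w (fun h => hw (List.mem_cons_of_mem _ h))]
    exact pvUpd_get?_of_ne vis v b (fun h => hw (h ▸ List.mem_cons_self))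

lemma pvFold_get?_of_mem (vis : PySem.Set (Int × Int)) (v : Int × Int) :
    ∀ (l : List (Int × Int)) (b : PySem.Dict (Int × Int) Int) (w : Int × Int), l.Nodup →
      w ∈ l → (l.foldl (pvUpd vis v) b).get? w = pvF v w vis (b.get? w) := by
  intro l
  induction l with
  | nil => intro b w _ hw; simp at hw
  | cons x xs ih =>
    intro b w hnd hw
    simp only [List.foldl_cons]
    rcases List.mem_cons.1 hw with rfl | hw'
    · rw [pvFold_get?_of_not_mem vis v xs _ w (List.nodup_cons.1 hnd).1]
      exact pvUpd_get?_self vis v b w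
    · rw [ih _ w (List.nodup_cons.1 hnd).2 hw']
      congr 1
      exact pvUpd_get?_of_ne vis v b
        (fun h => (List.nodup_cons.1 hnd).1 (h ▸ hw'))

lemma pvF_minD (v w : Int × Int) (vis : PySem.Set (Int × Int)) (l : List Int)
    (hc : PySem.Set.contains vis w = false) (hwv : v ≠ w) :
    pvF v w vis (pvMinD? l) =
      pvMinD? (l ++ if v ≠ w ∧ pvManhattan v w < 6 then [pvManhattan v w] else []) := by
  unfold pvF
  rw [if_neg (fun h => by rw [hc] at h; exact Bool.false_ne_true h)]
  by_cases hlt : pvManhattan v w < 6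
  · rw [if_pos hlt, if_pos ⟨hwv, hlt⟩, pvMinD?_append_singleton]
    cases ho : pvMinD? l with
    | none => rfl
    | some m =>
      show (if pvManhattan v w < m then some (pvManhattan v w) else some m) =
        some (min m (pvManhattan v w))
      by_cases h2 : pvManhattan v w < m
      · rw [if_pos h2, min_eq_right (le_of_lt h2)]
      · rw [if_neg h2, min_eq_left (by omega)]
  · rw [if_neg hlt, if_neg (by tauto), List.append_nil]

-- the key fact for B's inner update loop: after the scan over pts, the dict holds
-- exactly the minimal crossing distances with respect to seen ++ [v]
lemma pvBest2_inv (stars : List (Int × Int)) (seen visited : List (Int × Int)) (v : Int × Int)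
    (best1 : PySem.Dict (Int × Int) Int) (_hv : v ∈ stars)
    (hpre : ∀ w, best1.get? w =
      if w ∉ PySem.Set.add visited v ∧ w ∈ stars then pvMinD? (pvCross seen w) else none) :
    ∀ w, ((PySem.List.dedup stars).foldl (pvUpd (PySem.Set.add visited v) v) best1).get? w =
      if w ∉ PySem.Set.add visited v ∧ w ∈ stars then pvMinD? (pvCross (seen ++ [v]) w)
      else none := by
  intro w
  have hmemdedup : w ∈ PySem.List.dedup stars ↔ w ∈ stars := by
    rw [PySem.List.dedup_eq_ofList]
    exact PySem.Set.mem_ofList stars w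
  by_cases hw : w ∈ PySem.List.dedup stars
  · have hws : w ∈ stars := hmemdedup.1 hw
    rw [pvFold_get?_of_mem _ _ _ _ _
      (by rw [PySem.List.dedup_eq_ofList]; exact PySem.Set.nodup_ofList stars) hw]
    rw [hpre w]
    by_cases hvis : w ∈ PySem.Set.add visited v
    · have hc : PySem.Set.contains (PySem.Set.add visited v) w = true :=
        (PySem.Set.contains_iff _ _).2 hvis
      have hcond : ¬ (w ∉ PySem.Set.add visited v ∧ w ∈ stars) := fun hcon => hcon.1 hvis
      rw [if_neg hcond, if_neg hcond]
      unfold pvF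
      rw [if_pos hc]
    · have hc : PySem.Set.contains (PySem.Set.add visited v) w = false := by
        rw [← Bool.not_eq_true]
        exact fun h => hvis ((PySem.Set.contains_iff _ _).1 h)
      have hwv : v ≠ w := by
        intro h
        exact hvis (h ▸ ((PySem.Set.mem_add visited v v).2 (Or.inr rfl)))
      have hcond : (w ∉ PySem.Set.add visited v ∧ w ∈ stars) := ⟨hvis, hws⟩
      rw [if_pos hcond, if_pos hcond, pvCross_append]
      exact pvF_minD v w _ _ hc hwv
  · have hws : w ∉ stars := fun h => hw (hmemdedup.2 h)
    rw [pvFold_get?_of_not_mem _ _ _ _ _ hw, hpre w]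
    simp [hws]

-- ---------- helper: removing one fresh element from a distinct filtered list ----------

lemma pvFilter_append_len {l seen : List (Int × Int)} {v : Int × Int}
    (hnd : l.Nodup) (hvl : v ∈ l) (hvs : v ∉ seen) :
    (l.filter (fun x => decide (x ∉ seen ++ [v]))).length + 1 =
      (l.filter (fun x => decide (x ∉ seen))).length := by
  have h1 : l.filter (fun x => decide (x ∉ seen ++ [v])) =
      (l.filter (fun x => decide (x ∉ seen))).filter (fun x => x != v) := by
    rw [List.filter_filter]
    apply List.filter_congr
    intro x _
    by_cases hx : x ∈ seen <;> by_cases hxv : x = v <;>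
      simp [hx, hxv, List.mem_append]
  rw [h1]
  have hnd' : (l.filter (fun x => decide (x ∉ seen))).Nodup := hnd.filter _
  have hv' : v ∈ l.filter (fun x => decide (x ∉ seen)) :=
    List.mem_filter.2 ⟨hvl, by simp [hvs]⟩
  rw [← List.Nodup.erase_eq_filter hnd' v, List.length_erase_of_mem hv']
  have hpos := List.length_pos_of_mem hv'
  omega

lemma pvLe_to_lt {d e : Int} {v w : Int × Int}
    (hle : pvEntryLe (d, v) (e, w) = true) (hne : v ≠ w) : pvKeyLt (v, d) (w, e) = true := by
  obtain ⟨v1, v2⟩ := v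
  obtain ⟨w1, w2⟩ := w
  have hne' : v1 ≠ w1 ∨ v2 ≠ w2 := by
    by_cases h1 : v1 = w1
    · by_cases h2 : v2 = w2
      · exact absurd (by rw [h1, h2]) hne
      · exact Or.inr h2
    · exact Or.inl h1
  simp only [pvEntryLe_iff, pvKeyLt_iff] at *
  omega

-- ---------- the bisimulation invariant between A's and B's inner loops ----------

structure PvInv (stars visited0 : List (Int × Int)) (pq : List (Int × (Int × Int)))
    (seen : List (Int × Int)) (best : PySem.Dict (Int × Int) Int)
    (visited : List (Int × Int)) (total totalB count : Int) : Prop where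
  seen_sub : ∀ x ∈ seen, x ∈ stars
  seen_nd : seen.Nodup
  seen_disj : ∀ x ∈ seen, x ∉ visited0
  vis_iff : ∀ x, x ∈ visited ↔ x ∈ visited0 ∨ x ∈ seen
  tot_eq : totalB = total
  cnt_eq : count = (seen.length : Int)
  pq_dom : ∀ e ∈ pq, e.2 ∈ stars ∧ (e.2 ∉ seen → e.2 ∉ visited0 ∧
    ∃ u ∈ seen, u ≠ e.2 ∧ e.1 = pvManhattan u e.2 ∧ e.1 < 6)
  pq_comp : ∀ w ∈ stars, w ∉ seen → ∀ u ∈ seen, u ≠ w → pvManhattan u w < 6 →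
    (pvManhattan u w, w) ∈ pq
  best_inv : ∀ w, best.get? w =
    if w ∉ visited ∧ w ∈ stars then pvMinD? (pvCross seen w) else none
  best_nd : best.keys.Nodup
  cl0 : ∀ u ∈ visited0, ∀ w ∈ stars, pvManhattan u w < 6 → w ∈ visited0

-- what the two inner loops agree on when they finish
def pvPost (stars visited0 : List (Int × Int)) (ra : Int × PySem.Set (Int × Int))
    (rb : Int × Int × PySem.Set (Int × Int)) : Prop :=
  rb.1 = ra.1 ∧ rb.2.1 = (ra.2.length : Int) ∧
  (∀ x, x ∈ rb.2.2 ↔ x ∈ visited0 ∨ x ∈ ra.2) ∧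
  (∀ x ∈ ra.2, x ∈ stars) ∧
  (∀ u ∈ rb.2.2, ∀ w ∈ stars, pvManhattan u w < 6 → w ∈ rb.2.2)

lemma pvBest_items_empty {stars visited0 pq seen best visited total totalB count}
    (inv : PvInv stars visited0 pq seen best visited total totalB count)
    (hpq : pq = []) : best.items = [] := by
  cases hitems : best.items with
  | nil => rfl
  | cons p ps =>
    exfalso
    have hmem : (p.1, p.2) ∈ best.items := by rw [hitems]; exact List.mem_cons_self
    have hget : best.get? p.1 = some p.2 :=
      (PySem.Dict.get?_eq_some_iff_mem_items best p.1 p.2 inv.best_nd).2 hmem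
    rw [inv.best_inv p.1] at hget
    by_cases hcond : p.1 ∉ visited ∧ p.1 ∈ stars
    · rw [if_pos hcond] at hget
      obtain ⟨he, _⟩ := pvMinD?_spec hget
      obtain ⟨u, hu, hune, hult, heq⟩ := pvMem_cross.1 he
      have hns : p.1 ∉ seen := fun h => hcond.1 ((inv.vis_iff p.1).2 (Or.inr h))
      have := inv.pq_comp p.1 hcond.2 hns u hu hune hult
      rw [hpq] at this
      simp at this
    · rw [if_neg hcond] at hget
      simp at hget

lemma pvEnd {stars visited0 pq seen best visited total totalB count} (fb : Nat)
    (inv : PvInv stars visited0 pq seen best visited total totalB count)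
    (hpq : pq = []) :
    pvPost stars visited0 (total, seen)
      (pvPrimB (PySem.List.dedup stars) fb best visited totalB count) := by
  rw [pvPrimB_empty _ _ _ _ _ _ (pvBest_items_empty inv hpq)]
  refine ⟨inv.tot_eq, inv.cnt_eq, inv.vis_iff, inv.seen_sub, ?_⟩
  intro u hu w hw hlt
  rcases (inv.vis_iff u).1 hu with h0 | hs
  · exact (inv.vis_iff w).2 (Or.inl (inv.cl0 u h0 w hw hlt))
  · by_cases hws : w ∈ seen
    · exact (inv.vis_iff w).2 (Or.inr hws)
    · by_cases huw : u = w
      · exact absurd (huw ▸ hs) hws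
      · have := inv.pq_comp w hw hws u hs huw hlt
        rw [hpq] at this
        simp at this

-- ---------- the main bisimulation ----------

lemma pvInner (stars visited0 : List (Int × Int)) :
    ∀ (fa : Nat) (pq : List (Int × (Int × Int))) (seen : List (Int × Int))
      (fb : Nat) (best : PySem.Dict (Int × Int) Int) (visited : List (Int × Int))
      (total totalB count : Int),
      PvInv stars visited0 pq seen best visited total totalB count →
      pq.length + ((PySem.List.dedup stars).filter (fun x => decide (x ∉ seen))).length *
        (pvDirEdges stars).length ≤ fa →
      ((PySem.List.dedup stars).filter (fun x => decide (x ∉ visited))).length + 1 ≤ fb →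
      pvPost stars visited0 (pvPrimA (pvBuildAdj stars) fa pq seen total)
        (pvPrimB (PySem.List.dedup stars) fb best visited totalB count) := by
  intro fa
  induction fa with
  | zero =>
    intro pq seen fb best visited total totalB count inv hfa hfb
    have hpq : pq = [] := by
      cases pq with
      | nil => rfl
      | cons e es => simp at hfa
    subst hpq
    exact pvEnd fb inv rfl
  | succ n IH =>
    intro pq seen fb best visited total totalB count inv hfa hfb
    cases hpop : pvPopMin pq with
    | none =>
      have hpq : pq = [] := (pvPopMin_none_iff pq).1 hpop
      subst hpq
      show pvPost stars visited0 (total, seen) _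
      exact pvEnd fb inv rfl
    | some mr =>
      obtain ⟨⟨d, v⟩, rest⟩ := mr
      obtain ⟨hmem, hrest, hminle⟩ := pvPopMin_spec hpop
      have hrlen : rest.length + 1 = pq.length := by
        rw [hrest, List.length_erase_of_mem hmem]
        have := List.length_pos_of_mem hmem
        omega
      have hAstep : pvPrimA (pvBuildAdj stars) (n + 1) pq seen total =
          (if PySem.Set.contains seen v then pvPrimA (pvBuildAdj stars) n rest seen total
           else
            pvPrimA (pvBuildAdj stars) n
              (rest ++ ((pvBuildAdj stars).getD v []).filter
                (fun e => ! PySem.Set.contains (PySem.Set.add seen v) e.2))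
              (PySem.Set.add seen v) (total + d)) := by
        simp only [pvPrimA]
        rw [hpop]
      by_cases hseen : PySem.Set.contains seen v = true
      · -- stale entry: A skips it, B does not move
        rw [hAstep, if_pos hseen]
        have hvseen : v ∈ seen := (PySem.Set.contains_iff _ _).1 hseen
        refine IH rest seen fb best visited total totalB count ?_ (by omega) hfb
        exact
          { seen_sub := inv.seen_sub
            seen_nd := inv.seen_nd
            seen_disj := inv.seen_disj
            vis_iff := inv.vis_iff
            tot_eq := inv.tot_eq
            cnt_eq := inv.cnt_eq
            pq_dom := fun e he => inv.pq_dom e (List.Sublist.mem he (hrest ▸ List.erase_sublist))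
            pq_comp := by
              intro w hw hws u hu hune hult
              have hin := inv.pq_comp w hw hws u hu hune hult
              have hne : (pvManhattan u w, w) ≠ (d, v) := by
                intro hcon
                have : w = v := congrArg Prod.snd hcon
                exact hws (this ▸ hvseen)
              rw [hrest]
              exact (List.mem_erase_of_ne hne).2 hin
            best_inv := inv.best_inv
            best_nd := inv.best_nd
            cl0 := inv.cl0 }
      · -- fresh node: both sides absorb v
        have hvns : v ∉ seen := fun h => hseen ((PySem.Set.contains_iff _ _).2 h)
        obtain ⟨hvstars, himp⟩ := inv.pq_dom (d, v) hmem
        obtain ⟨hv0, u0, hu0, hune0, hd0, hdlt⟩ := himp hvns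
        have hvnvis : v ∉ visited := by
          rw [inv.vis_iff]
          exact fun h => h.elim hv0 hvns
        rw [hAstep, if_neg hseen]
        have haddseen : PySem.Set.add seen v = seen ++ [v] := PySem.Set.add_of_not_mem hvns
        have haddvis : PySem.Set.add visited v = visited ++ [v] :=
          PySem.Set.add_of_not_mem hvnvis
        -- B pops the very same node with the same distance
        have hbv : best.get? v = some d := by
          rw [inv.best_inv v, if_pos ⟨hvnvis, hvstars⟩]
          apply pvMinD?_eq_some
          · exact pvMem_cross.2 ⟨u0, hu0, hune0, hd0 ▸ hdlt, hd0⟩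
          · intro e he
            obtain ⟨u, hu, hune, hult, heq⟩ := pvMem_cross.1 he
            have hinpq := inv.pq_comp v hvstars hvns u hu hune hult
            have hle := hminle _ hinpq
            rw [pvEntryLe_iff] at hle
            simp only at hle
            omega
        have hminitem : pvMinItem best.items = some (v, d) := by
          apply pvMinItem_eq
          · exact (PySem.Dict.get?_eq_some_iff_mem_items best v d inv.best_nd).1 hbv
          · intro y hy hne
            obtain ⟨w, e⟩ := y
            have hgw : best.get? w = some e :=
              (PySem.Dict.get?_eq_some_iff_mem_items best w e inv.best_nd).2 hy
            have hwv : w ≠ v := by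
              intro hcon
              subst hcon
              rw [hbv] at hgw
              refine hne ?_
              have : e = d := by injection hgw.symm
              rw [this]
            rw [inv.best_inv w] at hgw
            by_cases hcond : w ∉ visited ∧ w ∈ stars
            · rw [if_pos hcond] at hgw
              obtain ⟨he, _⟩ := pvMinD?_spec hgw
              obtain ⟨u, hu, hune, hult, heq⟩ := pvMem_cross.1 he
              have hws : w ∉ seen := fun h => hcond.1 ((inv.vis_iff w).2 (Or.inr h))
              have hinpq : (e, w) ∈ pq := by
                have := inv.pq_comp w hcond.2 hws u hu hune hult
                rw [← heq] at this
                exact this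
              exact pvLe_to_lt (hminle _ hinpq) (fun h => hwv h.symm)
            · rw [if_neg hcond] at hgw
              exact absurd hgw (by simp)
        -- unfold B one step
        cases fb with
        | zero => omega
        | succ k =>
          have hBstep : pvPrimB (PySem.List.dedup stars) (k + 1) best visited totalB count =
              pvPrimB (PySem.List.dedup stars) k
                ((PySem.List.dedup stars).foldl (pvUpd (PySem.Set.add visited v) v)
                  (best.erase v))
                (PySem.Set.add visited v) (totalB + d) (count + 1) := by
            simp only [pvPrimB]
            rw [hminitem]
            rfl
          rw [hBstep]
          have hnd_dedup : (PySem.List.dedup stars).Nodup := by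
            rw [PySem.List.dedup_eq_ofList]; exact PySem.Set.nodup_ofList stars
          have hv_dedup : v ∈ PySem.List.dedup stars := by
            rw [PySem.List.dedup_eq_ofList]; exact (PySem.Set.mem_ofList stars v).2 hvstars
          have hUseen := pvFilter_append_len hnd_dedup hv_dedup hvns
          have hUvis := pvFilter_append_len hnd_dedup hv_dedup hvnvis
          -- the frontier dict after B's update scan
          have hpre : ∀ w, (best.erase v).get? w =
              if w ∉ PySem.Set.add visited v ∧ w ∈ stars then pvMinD? (pvCross seen w)
              else none := by
            intro w
            by_cases hwv : w = v
            · subst hwv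
              rw [pvGet?_erase_self]
              rw [if_neg (fun hcon => hcon.1 ((PySem.Set.mem_add visited w w).2 (Or.inr rfl)))]
            · rw [pvGet?_erase_of_ne best hwv, inv.best_inv w]
              by_cases hwvis : w ∈ visited
              · rw [if_neg (by tauto), if_neg (fun hcon =>
                  hcon.1 ((PySem.Set.mem_add visited v w).2 (Or.inl hwvis)))]
              · have hwadd : w ∉ PySem.Set.add visited v := by
                  intro hcon
                  rcases (PySem.Set.mem_add visited v w).1 hcon with h | h
                  · exact hwvis h
                  · exact hwv h
                by_cases hws : w ∈ stars
                · rw [if_pos ⟨hwvis, hws⟩, if_pos ⟨hwadd, hws⟩]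
                · rw [if_neg (by tauto), if_neg (by tauto)]
          have hbest2 := pvBest2_inv stars seen visited v (best.erase v) hvstars hpre
          refine IH (rest ++ ((pvBuildAdj stars).getD v []).filter
              (fun e => ! PySem.Set.contains (PySem.Set.add seen v) e.2))
            (PySem.Set.add seen v) k _ (PySem.Set.add visited v) (total + d) (totalB + d)
            (count + 1) ?_ ?_ ?_
          · -- the invariant after one step
            refine
              { seen_sub := ?_, seen_nd := ?_, seen_disj := ?_, vis_iff := ?_, tot_eq := ?_,
                cnt_eq := ?_, pq_dom := ?_, pq_comp := ?_, best_inv := ?_, best_nd := ?_,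
                cl0 := inv.cl0 }
            · intro x hx
              rw [haddseen] at hx
              rcases List.mem_append.1 hx with h | h
              · exact inv.seen_sub x h
              · rw [List.mem_singleton.1 h]; exact hvstars
            · exact PySem.Set.nodup_add seen v inv.seen_nd
            · intro x hx
              rw [haddseen] at hx
              rcases List.mem_append.1 hx with h | h
              · exact inv.seen_disj x h
              · rw [List.mem_singleton.1 h]; exact hv0
            · intro x
              rw [haddseen, haddvis]
              simp only [List.mem_append, List.mem_singleton, inv.vis_iff x]
              tauto
            · rw [inv.tot_eq]
            · rw [inv.cnt_eq, haddseen]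
              simp only [List.length_append, List.length_singleton]
              push_cast
              ring
            · intro e he
              rcases List.mem_append.1 he with h | h
              · have hrm : e ∈ pq := List.Sublist.mem h (hrest ▸ List.erase_sublist)
                obtain ⟨h1, h2⟩ := inv.pq_dom e hrm
                refine ⟨h1, fun hns => ?_⟩
                have hns' : e.2 ∉ seen := fun hc =>
                  hns ((PySem.Set.mem_add seen v e.2).2 (Or.inl hc))
                obtain ⟨h3, u, hu, h4, h5, h6⟩ := h2 hns'
                exact ⟨h3, u, (PySem.Set.mem_add seen v u).2 (Or.inl hu), h4, h5, h6⟩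
              · obtain ⟨hadj, hcnt⟩ := List.mem_filter.1 h
                have hens : e.2 ∉ PySem.Set.add seen v := by
                  intro hc
                  rw [(PySem.Set.contains_iff _ _).2 hc] at hcnt
                  exact Bool.noConfusion hcnt
                have henev : e.2 ≠ v := fun hc =>
                  hens (hc ▸ (PySem.Set.mem_add seen v v).2 (Or.inr rfl))
                obtain ⟨e1, e2⟩ := e
                have hadj' := (pvMem_adj henev e1).1 hadj
                refine ⟨hadj'.2.1, fun _ => ⟨?_, v,
                  (PySem.Set.mem_add seen v v).2 (Or.inr rfl),
                  fun hc => henev hc.symm, hadj'.2.2.1, hadj'.2.2.2⟩⟩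
                intro hc
                exact hv0 (inv.cl0 e2 hc v hvstars
                  (by rw [← pvManhattan_comm]; exact hadj'.2.2.1 ▸ hadj'.2.2.2))
            · intro w hw hws u hu hune hult
              have hwsv : w ∉ seen := fun hc => hws ((PySem.Set.mem_add seen v w).2 (Or.inl hc))
              have hwnev : w ≠ v := fun hc =>
                hws (hc ▸ (PySem.Set.mem_add seen v v).2 (Or.inr rfl))
              rcases (PySem.Set.mem_add seen v u).1 hu with hu' | hu'
              · have hin := inv.pq_comp w hw hwsv u hu' hune hult
                apply List.mem_append_left
                have hne : (pvManhattan u w, w) ≠ (d, v) := by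
                  intro hcon
                  exact hwnev (congrArg Prod.snd hcon)
                rw [hrest]
                exact (List.mem_erase_of_ne hne).2 hin
              · subst hu'
                apply List.mem_append_right
                apply List.mem_filter.2
                refine ⟨(pvMem_adj hwnev (pvManhattan u w)).2 ⟨hvstars, hw, rfl, hult⟩, ?_⟩
                simp only [Bool.not_eq_true']
                rw [← Bool.not_eq_true, PySem.Set.contains_iff]
                exact hws
            · intro w
              rw [hbest2 w, haddseen]
            · exact pvFold_nodup _ _ _ _ (pvNodup_keys_erase best v inv.best_nd)
          · -- fuel for A
            rw [List.length_append, haddseen]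
            have hpushlen : (((pvBuildAdj stars).getD v []).filter
                (fun e => ! PySem.Set.contains (seen ++ [v]) e.2)).length ≤
                (pvDirEdges stars).length :=
              le_trans (List.length_filter_le _ _) (length_pvAdj_le stars v)
            have hmul : ((PySem.List.dedup stars).filter
                (fun x => decide (x ∉ seen))).length * (pvDirEdges stars).length =
                ((PySem.List.dedup stars).filter
                  (fun x => decide (x ∉ seen ++ [v]))).length * (pvDirEdges stars).length +
                (pvDirEdges stars).length := by
              rw [← hUseen]
              ring
            rw [hmul] at hfa
            set Q := ((PySem.List.dedup stars).filter
              (fun x => decide (x ∉ seen ++ [v]))).length * (pvDirEdges stars).length with hQ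
            omega
          · -- fuel for B
            rw [haddvis]
            omega

-- ---------- the outer loops ----------

lemma pvLoopA_nil (adj : PySem.Dict (Int × Int) (List (Int × (Int × Int)))) (fuel : Nat)
    (sizes : List Int) : pvLoopA adj fuel [] sizes = sizes := by
  simp [pvLoopA]

lemma pvLoopA_cons (adj : PySem.Dict (Int × Int) (List (Int × (Int × Int)))) (fuel : Nat)
    (start : Int × Int) (rest : List (Int × Int)) (sizes : List Int) :
    pvLoopA adj fuel (start :: rest) sizes =
      pvLoopA adj fuel
        (rest.filter (fun x =>
          ! PySem.Set.contains (pvPrimA adj fuel [(0, start)] PySem.Set.empty 0).2 x))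
        (sizes ++ [(pvPrimA adj fuel [(0, start)] PySem.Set.empty 0).1 +
          PySem.Set.len (pvPrimA adj fuel [(0, start)] PySem.Set.empty 0).2]) := by
  rw [pvLoopA]

lemma pvOuter (stars : List (Int × Int)) :
    ∀ (rest visited : List (Int × Int)) (sizes : List Int),
      (∀ x ∈ rest, x ∈ stars) →
      (∀ u ∈ visited, ∀ w ∈ stars, pvManhattan u w < 6 → w ∈ visited) →
      pvLoopA (pvBuildAdj stars) (stars.length * (2 * stars.length * stars.length) + 1)
        (rest.filter (fun x => ! PySem.Set.contains visited x)) sizes =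
      pvLoopB (PySem.List.dedup stars) (stars.length + 1) rest visited sizes := by
  intro rest
  induction rest with
  | nil =>
    intro visited sizes _ _
    rw [List.filter_nil, pvLoopA_nil]
    rfl
  | cons s ls ih =>
    intro visited sizes hsub hcl
    have hsstars : s ∈ stars := hsub s List.mem_cons_self
    by_cases hv : PySem.Set.contains visited s = true
    · rw [List.filter_cons, hv]
      simp only [Bool.not_true, Bool.false_eq_true, if_false]
      rw [show pvLoopB (PySem.List.dedup stars) (stars.length + 1) (s :: ls) visited sizes =
        pvLoopB (PySem.List.dedup stars) (stars.length + 1) ls visited sizes by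
          simp only [pvLoopB, hv]; rfl]
      exact ih visited sizes (fun x hx => hsub x (List.mem_cons_of_mem _ hx)) hcl
    · have hsnvis : s ∉ visited := fun h => hv ((PySem.Set.contains_iff _ _).2 h)
      have hvf : PySem.Set.contains visited s = false := by
        rw [← Bool.not_eq_true]
        exact hv
      rw [List.filter_cons, hvf]
      simp only [Bool.not_false, if_true]
      -- abbreviations
      have hnd_dedup : (PySem.List.dedup stars).Nodup := by
        rw [PySem.List.dedup_eq_ofList]; exact PySem.Set.nodup_ofList stars
      have hs_dedup : s ∈ PySem.List.dedup stars := by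
        rw [PySem.List.dedup_eq_ofList]; exact (PySem.Set.mem_ofList stars s).2 hsstars
      -- A's first step on the fresh component
      have hpop0 : pvPopMin [((0 : Int), s)] = some (((0 : Int), s), []) := by
        simp [pvPopMin]
      have hA0 : pvPrimA (pvBuildAdj stars)
          (stars.length * (2 * stars.length * stars.length) + 1) [(0, s)] PySem.Set.empty 0 =
          pvPrimA (pvBuildAdj stars) (stars.length * (2 * stars.length * stars.length))
            (((pvBuildAdj stars).getD s []).filter
              (fun e => ! PySem.Set.contains ([s] : List (Int × Int)) e.2))
            [s] 0 := by
        simp only [pvPrimA]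
        rw [hpop0]
        rfl
      -- B's first step
      have hitems0 : (PySem.Dict.empty.insert s (0 : Int)).items = [(s, 0)] := by
        rw [PySem.Dict.items_insert_of_not_contains]
        · rfl
        · rfl
      have hmin0 : pvMinItem (PySem.Dict.empty.insert s (0 : Int)).items = some (s, 0) := by
        rw [hitems0]
        rfl
      have haddvis : PySem.Set.add visited s = visited ++ [s] :=
        PySem.Set.add_of_not_mem hsnvis
      have hB0 : ∀ k, pvPrimB (PySem.List.dedup stars) (k + 1)
          (PySem.Dict.empty.insert s 0) visited 0 0 =
          pvPrimB (PySem.List.dedup stars) k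
            ((PySem.List.dedup stars).foldl (pvUpd (PySem.Set.add visited s) s)
              ((PySem.Dict.empty.insert s 0).erase s))
            (PySem.Set.add visited s) 0 1 := by
        intro k
        simp only [pvPrimB]
        rw [hmin0]
        rfl
      -- the invariant after the first step
      have hpre : ∀ w, ((PySem.Dict.empty.insert s (0 : Int)).erase s).get? w =
          if w ∉ PySem.Set.add visited s ∧ w ∈ stars then pvMinD? (pvCross [] w)
          else none := by
        intro w
        have hlhs : ((PySem.Dict.empty.insert s (0 : Int)).erase s).get? w = none := by
          by_cases hws : w = s
          · subst hws
            exact pvGet?_erase_self _ w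
          · rw [pvGet?_erase_of_ne _ hws, PySem.Dict.get?_insert_of_ne _ _ hws]
            exact PySem.Dict.get?_empty w
        rw [hlhs]
        split <;> rfl
      have hbest2 := pvBest2_inv stars [] visited s ((PySem.Dict.empty.insert s 0).erase s)
        hsstars hpre
      have hinv : PvInv stars visited
          (((pvBuildAdj stars).getD s []).filter
            (fun e => ! PySem.Set.contains ([s] : List (Int × Int)) e.2))
          [s]
          ((PySem.List.dedup stars).foldl (pvUpd (PySem.Set.add visited s) s)
            ((PySem.Dict.empty.insert s 0).erase s))
          (PySem.Set.add visited s) 0 0 1 := by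
        refine
          { seen_sub := ?_, seen_nd := by simp, seen_disj := ?_, vis_iff := ?_, tot_eq := rfl,
            cnt_eq := by simp, pq_dom := ?_, pq_comp := ?_, best_inv := ?_, best_nd := ?_,
            cl0 := hcl }
        · intro x hx
          rw [List.mem_singleton.1 hx]
          exact hsstars
        · intro x hx
          rw [List.mem_singleton.1 hx]
          exact hsnvis
        · intro x
          rw [haddvis]
          simp only [List.mem_append, List.mem_singleton]
        · intro e he
          obtain ⟨hadj, hcnt⟩ := List.mem_filter.1 he
          have hens : e.2 ∉ ([s] : List (Int × Int)) := by
            intro hc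
            rw [(PySem.Set.contains_iff _ _).2 hc] at hcnt
            exact Bool.noConfusion hcnt
          have henes : e.2 ≠ s := fun hc => hens (hc ▸ List.mem_cons_self)
          obtain ⟨e1, e2⟩ := e
          have hadj' := (pvMem_adj henes e1).1 hadj
          refine ⟨hadj'.2.1, fun _ => ⟨?_, s, List.mem_cons_self,
            fun hc => henes hc.symm, hadj'.2.2.1, hadj'.2.2.2⟩⟩
          intro hc
          exact hsnvis (hcl e2 hc s hsstars
            (by rw [← pvManhattan_comm]; exact hadj'.2.2.1 ▸ hadj'.2.2.2))
        · intro w hw hws u hu hune hult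
          have hwnes : w ≠ s := fun hc => hws (hc ▸ List.mem_cons_self)
          have hus : u = s := List.mem_singleton.1 hu
          subst hus
          apply List.mem_filter.2
          refine ⟨(pvMem_adj hwnes (pvManhattan u w)).2 ⟨hsstars, hw, rfl, hult⟩, ?_⟩
          simp only [Bool.not_eq_true']
          rw [← Bool.not_eq_true, PySem.Set.contains_iff]
          exact hws
        · intro w
          have := hbest2 w
          rw [List.nil_append] at this
          exact this
        · exact pvFold_nodup _ _ _ _
            (pvNodup_keys_erase _ s
              (PySem.Dict.nodup_keys_insert _ s 0 PySem.Dict.nodup_keys_empty))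
      -- fuel bounds for the inner run
      have hE : (pvDirEdges stars).length ≤ 2 * (stars.length * stars.length) :=
        length_pvDirEdges_le stars
      have hlen_dedup : (PySem.List.dedup stars).length ≤ stars.length := by
        rw [PySem.List.dedup_eq_ofList]
        exact PySem.Set.length_ofList_le stars
      have hfilter_nil : (PySem.List.dedup stars).filter
          (fun x => decide (x ∉ ([] : List (Int × Int)))) = PySem.List.dedup stars := by
        apply List.filter_eq_self.2
        intro x _
        simp
      have hD1 : ((PySem.List.dedup stars).filter
            (fun x => decide (x ∉ ([s] : List (Int × Int))))).length + 1 =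
          (PySem.List.dedup stars).length := by
        have h1 := pvFilter_append_len (seen := ([] : List (Int × Int))) hnd_dedup hs_dedup
          (by simp)
        rw [List.nil_append] at h1
        rw [h1, hfilter_nil]
      have hfa0 : (((pvBuildAdj stars).getD s []).filter
            (fun e => ! PySem.Set.contains ([s] : List (Int × Int)) e.2)).length +
          ((PySem.List.dedup stars).filter
            (fun x => decide (x ∉ ([s] : List (Int × Int))))).length *
            (pvDirEdges stars).length ≤
          stars.length * (2 * stars.length * stars.length) := by
        have h1 : (((pvBuildAdj stars).getD s []).filter
            (fun e => ! PySem.Set.contains ([s] : List (Int × Int)) e.2)).length ≤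
            (pvDirEdges stars).length :=
          le_trans (List.length_filter_le _ _) (length_pvAdj_le stars s)
        have h2 : ((PySem.List.dedup stars).filter
              (fun x => decide (x ∉ ([s] : List (Int × Int))))).length *
              (pvDirEdges stars).length + (pvDirEdges stars).length =
            (PySem.List.dedup stars).length * (pvDirEdges stars).length := by
          rw [← hD1]
          ring
        have h3 : (PySem.List.dedup stars).length * (pvDirEdges stars).length ≤
            stars.length * (2 * (stars.length * stars.length)) :=
          Nat.mul_le_mul hlen_dedup hE
        have h4 : stars.length * (2 * (stars.length * stars.length)) =
            stars.length * (2 * stars.length * stars.length) := by ring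
        rw [h4] at h3
        omega
      have hfb0 : ((PySem.List.dedup stars).filter
            (fun x => decide (x ∉ visited ++ [s]))).length + 1 ≤ stars.length := by
        have h1 := pvFilter_append_len (seen := visited) hnd_dedup hs_dedup hsnvis
        have h2 : ((PySem.List.dedup stars).filter
            (fun x => decide (x ∉ visited))).length ≤ (PySem.List.dedup stars).length :=
          List.length_filter_le _ _
        omega
      have hpost := pvInner stars visited
        (stars.length * (2 * stars.length * stars.length))
        (((pvBuildAdj stars).getD s []).filter
          (fun e => ! PySem.Set.contains ([s] : List (Int × Int)) e.2))
        [s] stars.length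
        ((PySem.List.dedup stars).foldl (pvUpd (PySem.Set.add visited s) s)
          ((PySem.Dict.empty.insert s 0).erase s))
        (PySem.Set.add visited s) 0 0 1 hinv hfa0
        (by rw [haddvis]; exact hfb0)
      set ra := pvPrimA (pvBuildAdj stars) (stars.length * (2 * stars.length * stars.length))
        (((pvBuildAdj stars).getD s []).filter
          (fun e => ! PySem.Set.contains ([s] : List (Int × Int)) e.2))
        [s] 0 with hra
      set rb := pvPrimB (PySem.List.dedup stars) stars.length
        ((PySem.List.dedup stars).foldl (pvUpd (PySem.Set.add visited s) s)
          ((PySem.Dict.empty.insert s 0).erase s))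
        (PySem.Set.add visited s) 0 1 with hrb
      obtain ⟨hpost1, hpost2, hpost3, hpost4, hpost5⟩ := hpost
      -- unfold one step of each outer loop
      rw [pvLoopA_cons, hA0]
      rw [show pvLoopB (PySem.List.dedup stars) (stars.length + 1) (s :: ls) visited sizes =
          pvLoopB (PySem.List.dedup stars) (stars.length + 1) ls rb.2.2
            (sizes ++ [rb.1 + rb.2.1]) by
        simp only [pvLoopB, hvf, Bool.false_eq_true, if_false]
        rw [hB0 stars.length, ← hrb]]
      -- the appended sizes agree
      have hsize : ra.1 + PySem.Set.len ra.2 = rb.1 + rb.2.1 := by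
        rw [PySem.Set.len_eq, hpost1, hpost2]
      rw [hsize]
      -- the remaining lists agree
      have hfilters : (ls.filter (fun x => ! PySem.Set.contains visited x)).filter
          (fun x => ! PySem.Set.contains ra.2 x) =
          ls.filter (fun x => ! PySem.Set.contains rb.2.2 x) := by
        rw [List.filter_filter]
        apply List.filter_congr
        intro x _
        by_cases h1 : x ∈ rb.2.2
        · rcases (hpost3 x).1 h1 with h3 | h3 <;> simp [h1, h3]
        · have h3 : x ∉ visited := fun hc => h1 ((hpost3 x).2 (Or.inl hc))
          have h4 : x ∉ ra.2 := fun hc => h1 ((hpost3 x).2 (Or.inr hc))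
          simp [h1, h3, h4]
      rw [hfilters]
      exact ih rb.2.2 (sizes ++ [rb.1 + rb.2.1])
        (fun x hx => hsub x (List.mem_cons_of_mem _ hx)) hpost5

theorem pv_main (stars : List (Int × Int)) :
    brilliant_constellations stars = brilliant_constellations_alt stars := by
  by_cases hs : stars = []
  · simp [brilliant_constellations, brilliant_constellations_alt, hs]
  · unfold brilliant_constellations brilliant_constellations_alt
    rw [if_neg hs, if_neg hs]
    have h0 : PySem.Set.ofList stars =
        (PySem.List.dedup stars).filter (fun x => ! PySem.Set.contains PySem.Set.empty x) := by
      rw [PySem.List.dedup_eq_ofList]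
      symm
      apply List.filter_eq_self.2
      intro x _
      rfl
    have hsizes : pvLoopA (pvBuildAdj stars)
        (stars.length * (2 * stars.length * stars.length) + 1) (PySem.Set.ofList stars) [] =
        pvLoopB (PySem.List.dedup stars) (stars.length + 1) (PySem.List.dedup stars)
          PySem.Set.empty [] := by
      rw [h0]
      exact pvOuter stars (PySem.List.dedup stars) PySem.Set.empty []
        (fun x hx => by rwa [PySem.List.dedup_eq_ofList, PySem.Set.mem_ofList] at hx)
        (fun u hu => absurd hu (List.not_mem_nil))
    simp only [hsizes, PySem.List.length_sorted]

-- ===== VERDICT (by name: the statement is the Claim_ definition above) =====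
theorem brilliant_constellations_spec : Claim_equal_brilliant_constellations := by
  intro stars _
  unfold Spec_brilliant_constellations
  exact pv_main stars
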